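-- pv_equiv track=rewrite | github.com/wujack83/python_challanges | math_challanges/math.py | calc_sum_and_count_all_numbers_div_by_2_or_7_v2
-- ===== SOURCE A (Python) =====
-- def calc_sum_and_count_all_numbers_div_by_2_or_7_v2(max_exclusive):
--     count = 0
--     sum = 0
--
--     for i in range(1, max_exclusive):
--         is_divisible_by2or7 = i % 2 == 0 or i % 7 == 0
--         if is_divisible_by2or7:
--             count += 1
--             sum += i
--
--     return {"sum": sum, "count": count}
-- ===== SOURCE B (Python) =====
-- def _tri(k, n):
--     # count and sum of the positive multiples of k that are <= n
--     m = n // k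
--     return m, k * m * (m + 1) // 2
--
-- def calc_sum_and_count_all_numbers_div_by_2_or_7_v2(max_exclusive):
--     n = max_exclusive - 1
--     if n < 0:
--         n = 0
--     c2, s2 = _tri(2, n)
--     c7, s7 = _tri(7, n)
--     c14, s14 = _tri(14, n)
--     return {"sum": s2 + s7 - s14, "count": c2 + c7 - c14}
-- ===== Notes on version B (the rewrite author's own statement) =====
-- stated objective: faster
-- what changed: Replaced the O(n) loop over range(1, max_exclusive) with a closed-form inclusion-exclusion over arithmetic series of multiples of 2, 7 and 14.
import Mathlib
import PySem

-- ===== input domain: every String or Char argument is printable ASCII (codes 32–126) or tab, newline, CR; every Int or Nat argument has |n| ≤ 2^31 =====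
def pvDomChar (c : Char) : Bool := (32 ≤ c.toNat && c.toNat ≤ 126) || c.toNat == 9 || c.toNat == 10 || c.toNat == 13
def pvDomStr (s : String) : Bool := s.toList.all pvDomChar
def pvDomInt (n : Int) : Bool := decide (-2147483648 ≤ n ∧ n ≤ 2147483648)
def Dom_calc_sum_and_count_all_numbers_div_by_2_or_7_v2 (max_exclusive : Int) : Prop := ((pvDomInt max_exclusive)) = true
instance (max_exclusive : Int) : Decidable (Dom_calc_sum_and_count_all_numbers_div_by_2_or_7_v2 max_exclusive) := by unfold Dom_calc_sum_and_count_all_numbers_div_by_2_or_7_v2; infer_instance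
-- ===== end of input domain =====

-- B replaces A's O(n) loop with closed-form inclusion-exclusion over arithmetic series (multiples of 2 + 7 - 14).


-- ===== PORT A =====
def calc_sum_and_count_all_numbers_div_by_2_or_7_v2 (max_exclusive : Int) : List (String × Int) :=
  -- count = 0; sum = 0; for i in range(1, max_exclusive): …
  let res := (PySem.List.pyRange 1 max_exclusive 1).foldl
    (fun (st : Int × Int) i =>
      let is_divisible_by2or7 := PySem.Int.mod i 2 == 0 || PySem.Int.mod i 7 == 0
      if is_divisible_by2or7 then (st.1 + 1, st.2 + i) else st)
    (0, 0)
  [("sum", res.2), ("count", res.1)]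

-- ===== PORT B =====
-- count and sum of the positive multiples of k that are <= n (Source B's _tri)
def pvTri (k n : Int) : Int × Int :=
  let m := PySem.Int.floordiv n k
  (m, PySem.Int.floordiv (k * m * (m + 1)) 2)

def calc_sum_and_count_all_numbers_div_by_2_or_7_v2_alt (max_exclusive : Int) : List (String × Int) :=
  let n0 := max_exclusive - 1
  let n := if n0 < 0 then 0 else n0
  let t2 := pvTri 2 n
  let t7 := pvTri 7 n
  let t14 := pvTri 14 n
  [("sum", t2.2 + t7.2 - t14.2), ("count", t2.1 + t7.1 - t14.1)]

-- ===== PRECONDITION & SPEC =====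
def Spec_calc_sum_and_count_all_numbers_div_by_2_or_7_v2 (max_exclusive : Int) (out : List (String × Int)) : Prop := out = calc_sum_and_count_all_numbers_div_by_2_or_7_v2_alt max_exclusive
instance (max_exclusive : Int) (out : List (String × Int)) : Decidable (Spec_calc_sum_and_count_all_numbers_div_by_2_or_7_v2 max_exclusive out) := by unfold Spec_calc_sum_and_count_all_numbers_div_by_2_or_7_v2; infer_instance

-- ===== CLAIM (what is proved, stated in full; the proofs are below) =====
def Claim_equal_calc_sum_and_count_all_numbers_div_by_2_or_7_v2 : Prop := ∀ (max_exclusive : Int), Dom_calc_sum_and_count_all_numbers_div_by_2_or_7_v2 max_exclusive → Spec_calc_sum_and_count_all_numbers_div_by_2_or_7_v2 max_exclusive (calc_sum_and_count_all_numbers_div_by_2_or_7_v2 max_exclusive)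

-- ===== LEMMAS AND PROOFS =====

-- closed-form count and sum stated over Nat divisions
def pvCnt (n : Nat) : Int := ((n / 2 : Nat) : Int) + ((n / 7 : Nat) : Int) - ((n / 14 : Nat) : Int)
def pvSm (n : Nat) : Int :=
  ((2 * (n / 2 * (n / 2 + 1) / 2) : Nat) : Int)
  + ((7 * (n / 7 * (n / 7 + 1) / 2) : Nat) : Int)
  - ((14 * (n / 14 * (n / 14 + 1) / 2) : Nat) : Int)

theorem pv_tri_succ (m : Nat) : (m + 1) * (m + 2) / 2 = m * (m + 1) / 2 + (m + 1) := by
  obtain ⟨t, ht⟩ := Nat.even_mul_succ_self m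
  have h1 : (m + 1) * (m + 2) = (t + t) + 2 * (m + 1) := by rw [← ht]; ring
  omega

theorem pv_mul_tri (k m : Nat) : k * m * (m + 1) / 2 = k * (m * (m + 1) / 2) := by
  obtain ⟨t, ht⟩ := Nat.even_mul_succ_self m
  have h1 : k * m * (m + 1) = 2 * (k * t) := by rw [mul_assoc, ht]; ring
  have h2 : m * (m + 1) / 2 = t := by omega
  rw [h1, h2, Nat.mul_div_cancel_left _ (by norm_num)]

theorem pv_T_succ (k n : Nat) :
    k * ((n + 1) / k * ((n + 1) / k + 1) / 2)
      = k * (n / k * (n / k + 1) / 2) + (if k ∣ (n + 1) then n + 1 else 0) := by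
  by_cases hd : k ∣ (n + 1)
  · rw [Nat.succ_div_of_dvd hd, pv_tri_succ, Nat.mul_add, if_pos hd,
      show n / k + 1 = (n + 1) / k from (Nat.succ_div_of_dvd hd).symm,
      Nat.mul_div_cancel' hd]
  · rw [Nat.succ_div_of_not_dvd hd, if_neg hd]
    exact (Nat.add_zero _).symm

theorem pv_loopA (n : Nat) :
    (PySem.List.pyRange 1 (1 + (n : Int)) 1).foldl
      (fun (st : Int × Int) i =>
        let is_divisible_by2or7 := PySem.Int.mod i 2 == 0 || PySem.Int.mod i 7 == 0
        if is_divisible_by2or7 then (st.1 + 1, st.2 + i) else st)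
      (0, 0) = (pvCnt n, pvSm n) := by
  induction n with
  | zero =>
    rw [show (1 + ((0:Nat) : Int)) = 1 by norm_num,
      PySem.List.pyRange_one_eq_nil le_rfl]
    simp [pvCnt, pvSm]
  | succ n ih =>
    have hsplit : PySem.List.pyRange 1 (1 + ((n : Int) + 1)) 1
        = PySem.List.pyRange 1 (1 + (n : Int)) 1 ++ [1 + (n : Int)] := by
      have := PySem.List.pyRange_one_succ_right (a := 1) (b := 1 + (n : Int)) (by omega)
      rw [show (1 + ((n : Int) + 1)) = (1 + (n : Int)) + 1 by ring, this]
    push_cast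
    rw [hsplit, List.foldl_append, ih]
    simp only [List.foldl_cons, List.foldl_nil]
    have hcast : (1 + (n : Int)) = ((n + 1 : Nat) : Int) := by push_cast; ring
    rw [hcast]
    have hmod2 : (PySem.Int.mod ((n + 1 : Nat) : Int) 2 == 0) = decide ((2 : Nat) ∣ (n + 1)) := by
      have h : PySem.Int.mod ((n + 1 : Nat) : Int) 2 = 0 ↔ (2 : Nat) ∣ (n + 1) := by
        rw [PySem.Int.mod_eq_zero_iff_dvd]; omega
      show decide _ = decide _
      exact decide_eq_decide.mpr h
    have hmod7 : (PySem.Int.mod ((n + 1 : Nat) : Int) 7 == 0) = decide ((7 : Nat) ∣ (n + 1)) := by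
      have h : PySem.Int.mod ((n + 1 : Nat) : Int) 7 = 0 ↔ (7 : Nat) ∣ (n + 1) := by
        rw [PySem.Int.mod_eq_zero_iff_dvd]; omega
      show decide _ = decide _
      exact decide_eq_decide.mpr h
    rw [hmod2, hmod7]
    by_cases h2 : (2 : Nat) ∣ (n + 1) <;> by_cases h7 : (7 : Nat) ∣ (n + 1)
    · -- 2 and 7 divide, hence 14 does
      have h14 : (14 : Nat) ∣ (n + 1) := by omega
      simp only [h2, h7, decide_true, Bool.or_self, if_true, Prod.mk.injEq]
      refine ⟨?_, ?_⟩
      · simp only [pvCnt, Nat.succ_div_of_dvd h2, Nat.succ_div_of_dvd h7,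
          Nat.succ_div_of_dvd h14]
        push_cast; ring
      simp only [pvSm, pv_T_succ 2 n, pv_T_succ 7 n,
        pv_T_succ 14 n, if_pos h2, if_pos h7, if_pos h14]
      push_cast; ring
    · have h14 : ¬ (14 : Nat) ∣ (n + 1) := by omega
      simp only [h2, h7, decide_true, decide_false, Bool.or_false, if_true, Prod.mk.injEq]
      refine ⟨?_, ?_⟩
      · simp only [pvCnt, Nat.succ_div_of_dvd h2, Nat.succ_div_of_not_dvd h7,
          Nat.succ_div_of_not_dvd h14]
        push_cast; ring
      simp only [pvSm, pv_T_succ 2 n, pv_T_succ 7 n,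
        pv_T_succ 14 n, if_pos h2, if_neg h7, if_neg h14]
      push_cast; ring
    · have h14 : ¬ (14 : Nat) ∣ (n + 1) := by omega
      simp only [h2, h7, decide_true, decide_false, Bool.or_true, if_true, Prod.mk.injEq]
      refine ⟨?_, ?_⟩
      · simp only [pvCnt, Nat.succ_div_of_not_dvd h2, Nat.succ_div_of_dvd h7,
          Nat.succ_div_of_not_dvd h14]
        push_cast; ring
      simp only [pvSm, pv_T_succ 2 n, pv_T_succ 7 n,
        pv_T_succ 14 n, if_neg h2, if_pos h7, if_neg h14]
      push_cast; ring
    · have h14 : ¬ (14 : Nat) ∣ (n + 1) := by omega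
      simp only [h2, h7, decide_false, Bool.or_self, Bool.false_eq_true, if_false,
        pvCnt, pvSm, Nat.succ_div_of_not_dvd h2, Nat.succ_div_of_not_dvd h7,
        Nat.succ_div_of_not_dvd h14]

theorem pv_tri_nat (k n : Nat) :
    pvTri (k : Int) (n : Int) = (((n / k : Nat) : Int), ((k * (n / k * (n / k + 1) / 2) : Nat) : Int)) := by
  simp only [pvTri, PySem.Int.floordiv_natCast]
  have h1 : (k : Int) * ((n / k : Nat) : Int) * (((n / k : Nat) : Int) + 1)
      = ((k * (n / k) * (n / k + 1) : Nat) : Int) := by push_cast; ring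
  rw [h1, show (2:Int) = ((2:Nat):Int) by norm_num, PySem.Int.floordiv_natCast, pv_mul_tri]

theorem pv_altB (n : Nat) :
    calc_sum_and_count_all_numbers_div_by_2_or_7_v2_alt (1 + (n : Int))
      = [("sum", pvSm n), ("count", pvCnt n)] := by
  have hn : (1 + (n : Int)) - 1 = (n : Int) := by ring
  simp only [calc_sum_and_count_all_numbers_div_by_2_or_7_v2_alt, hn,
    if_neg (by omega : ¬ ((n : Int) < 0))]
  rw [show (2:Int) = ((2:Nat):Int) by norm_num, show (7:Int) = ((7:Nat):Int) by norm_num,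
    show (14:Int) = ((14:Nat):Int) by norm_num,
    pv_tri_nat 2 n, pv_tri_nat 7 n, pv_tri_nat 14 n]
  simp [pvCnt, pvSm]

-- ===== VERDICT (by name: the statement is the Claim_ definition above) =====
theorem calc_sum_and_count_all_numbers_div_by_2_or_7_v2_spec : Claim_equal_calc_sum_and_count_all_numbers_div_by_2_or_7_v2 := by
  intro m _
  unfold Spec_calc_sum_and_count_all_numbers_div_by_2_or_7_v2
  by_cases hm : m ≤ 1
  · have hnil : PySem.List.pyRange 1 m 1 = [] := PySem.List.pyRange_one_eq_nil hm
    simp only [calc_sum_and_count_all_numbers_div_by_2_or_7_v2, hnil, List.foldl_nil]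
    rcases lt_or_ge (m - 1) 0 with h | h
    · simp only [calc_sum_and_count_all_numbers_div_by_2_or_7_v2_alt, if_pos h]
      decide
    · have : m = 1 := by omega
      subst this
      simp only [calc_sum_and_count_all_numbers_div_by_2_or_7_v2_alt]
      norm_num
      decide
  · push Not at hm
    set n : Nat := (m - 1).toNat with hn
    have hm' : m = 1 + (n : Int) := by omega
    rw [hm', pv_altB]
    simp only [calc_sum_and_count_all_numbers_div_by_2_or_7_v2, pv_loopA]
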